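-- pv_equiv track=rewrite | github.com/dnxnf/Meachine-Learning-New | pythonProblem/28RectangleArea.py | compute_intersection_area
-- ===== SOURCE A (Python) =====
-- def compute_intersection_area(rectangles):
--     if len(rectangles) < 3:
--         return 0
--
--     # 初始相交区域设为第一个矩形
--     x1, y1, w1, h1 = rectangles[0]
--     inter_x_left = x1
--     inter_x_right = x1 + w1
--     inter_y_top = y1
--     inter_y_bottom = y1 - h1
--
--     # 依次与后面的矩形求交集
--     for rect in rectangles[1:]:
--         x, y, w, h = rect
--         current_x_left = x
--         current_x_right = x + w
--         current_y_top = y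
--         current_y_bottom = y - h
--
--         # 计算x轴方向的交集
--         new_x_left = max(inter_x_left, current_x_left)
--         new_x_right = min(inter_x_right, current_x_right)
--         if new_x_left >= new_x_right:
--             return 0
--
--         # 计算y轴方向的交集
--         new_y_top = min(inter_y_top, current_y_top)
--         new_y_bottom = max(inter_y_bottom, current_y_bottom)
--         if new_y_top <= new_y_bottom:
--             return 0
--
--         # 更新交集区域
--         inter_x_left, inter_x_right = new_x_left, new_x_right
--         inter_y_top, inter_y_bottom = new_y_top, new_y_bottom
--
--     # 计算面积
--     width = inter_x_right - inter_x_left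
--     height = inter_y_top - inter_y_bottom
--     area = width * height
--     return area
-- ===== SOURCE B (Python) =====
-- def compute_intersection_area(rectangles):
--     if len(rectangles) < 3:
--         return 0
--
--     def box(rects):
--         # intersection box (left, right, top, bottom) by divide and conquer
--         if len(rects) == 1:
--             x, y, w, h = rects[0]
--             return (x, x + w, y, y - h)
--         mid = len(rects) // 2
--         l1, r1, t1, b1 = box(rects[:mid])
--         l2, r2, t2, b2 = box(rects[mid:])
--         return (max(l1, l2), min(r1, r2), min(t1, t2), max(b1, b2))
--
--     left, right, top, bottom = box(rectangles)
--     if left >= right or top <= bottom: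
--         return 0
--     return (right - left) * (top - bottom)
-- ===== Notes on version B (the rewrite author's own statement) =====
-- stated objective: alternative
-- what changed: Replaced A's sequential running-intersection loop with early exits by a divide-and-conquer recursion that computes the intersection box of each half of the list and merges the two boxes, with one emptiness test at the end.
import Mathlib
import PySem

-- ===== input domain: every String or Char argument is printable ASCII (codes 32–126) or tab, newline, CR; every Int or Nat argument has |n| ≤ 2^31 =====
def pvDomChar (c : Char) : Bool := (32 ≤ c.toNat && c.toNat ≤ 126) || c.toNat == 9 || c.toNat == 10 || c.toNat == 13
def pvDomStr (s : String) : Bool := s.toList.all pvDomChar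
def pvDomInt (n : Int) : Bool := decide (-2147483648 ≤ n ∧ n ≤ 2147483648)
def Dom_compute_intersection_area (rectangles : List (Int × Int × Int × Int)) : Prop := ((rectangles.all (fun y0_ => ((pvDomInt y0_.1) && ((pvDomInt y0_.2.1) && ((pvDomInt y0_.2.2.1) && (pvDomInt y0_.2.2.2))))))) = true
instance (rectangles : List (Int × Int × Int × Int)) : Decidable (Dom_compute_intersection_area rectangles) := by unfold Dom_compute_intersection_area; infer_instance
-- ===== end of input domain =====

-- B replaces A's sequential running-intersection loop (with early exits) by a
-- divide-and-conquer recursion merging the intersection boxes of the two halves.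


-- ===== PORT A =====
-- the for-loop over rectangles[1:] with state (l, r, t, b) and early returns
def pvLoopA : Int → Int → Int → Int → List (Int × Int × Int × Int) → Int
  | l, r, t, b, [] => (r - l) * (t - b)
  | l, r, t, b, (x, y, w, h) :: rs =>
      let nl := max l x
      let nr := min r (x + w)
      if nl ≥ nr then 0
      else
        let nt := min t y
        let nb := max b (y - h)
        if nt ≤ nb then 0
        else pvLoopA nl nr nt nb rs

def compute_intersection_area (rectangles : List (Int × Int × Int × Int)) : Int :=
  if rectangles.length < 3 then 0
  else
    match rectangles with
    | [] => 0   -- unreachable: length ≥ 3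
    | (x1, y1, w1, h1) :: rest => pvLoopA x1 (x1 + w1) y1 (y1 - h1) rest

-- ===== PORT B =====
-- Source B's `box`: divide and conquer (the [] case is unreachable; Source B never calls box on [])
def pvBox : List (Int × Int × Int × Int) → Int × Int × Int × Int
  | [] => (0, 0, 0, 0)
  | [(x, y, w, h)] => (x, x + w, y, y - h)
  | p :: q :: rs =>
      let l := p :: q :: rs
      let mid := l.length / 2
      let b1 := pvBox (l.take mid)
      let b2 := pvBox (l.drop mid)
      (max b1.1 b2.1, min b1.2.1 b2.2.1, min b1.2.2.1 b2.2.2.1, max b1.2.2.2 b2.2.2.2)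
termination_by rs => rs.length
decreasing_by
  · simp; omega
  · simp; omega

def compute_intersection_area_alt (rectangles : List (Int × Int × Int × Int)) : Int :=
  if rectangles.length < 3 then 0
  else
    let b := pvBox rectangles
    let left := b.1
    let right := b.2.1
    let top := b.2.2.1
    let bottom := b.2.2.2
    if left ≥ right ∨ top ≤ bottom then 0
    else (right - left) * (top - bottom)

-- ===== PRECONDITION & SPEC =====
def Spec_compute_intersection_area (rectangles : List (Int × Int × Int × Int)) (out : Int) : Prop := out = compute_intersection_area_alt rectangles
instance (rectangles : List (Int × Int × Int × Int)) (out : Int) : Decidable (Spec_compute_intersection_area rectangles out) := by unfold Spec_compute_intersection_area; infer_instance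

-- ===== CLAIM (what is proved, stated in full; the proofs are below) =====
def Claim_equal_compute_intersection_area : Prop := ∀ (rectangles : List (Int × Int × Int × Int)), Dom_compute_intersection_area rectangles → Spec_compute_intersection_area rectangles (compute_intersection_area rectangles)

-- ===== LEMMAS AND PROOFS =====

-- proof-only helpers: a rectangle's box, box intersection, and the left fold of boxes
def pvToB (p : Int × Int × Int × Int) : Int × Int × Int × Int :=
  (p.1, p.1 + p.2.2.1, p.2.1, p.2.1 - p.2.2.2)

def pvComb (a b : Int × Int × Int × Int) : Int × Int × Int × Int :=
  (max a.1 b.1, min a.2.1 b.2.1, min a.2.2.1 b.2.2.1, max a.2.2.2 b.2.2.2)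

def pvFoldB : List (Int × Int × Int × Int) → Int × Int × Int × Int
  | [] => (0, 0, 0, 0)
  | p :: t => (t.map pvToB).foldl pvComb (pvToB p)

theorem pvComb_assoc (a b c : Int × Int × Int × Int) :
    pvComb (pvComb a b) c = pvComb a (pvComb b c) := by
  simp [pvComb, max_assoc, min_assoc]

theorem pvComb_pull (cs : List (Int × Int × Int × Int)) :
    ∀ (X c : Int × Int × Int × Int),
      pvComb X (cs.foldl pvComb c) = cs.foldl pvComb (pvComb X c) := by
  induction cs with
  | nil => intro X c; rfl
  | cons d cs ih =>
      intro X c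
      simp only [List.foldl]
      rw [ih, ← pvComb_assoc]

theorem pvFoldB_append (l1 l2 : List (Int × Int × Int × Int)) (h1 : l1 ≠ []) (h2 : l2 ≠ []) :
    pvFoldB (l1 ++ l2) = pvComb (pvFoldB l1) (pvFoldB l2) := by
  match l1, l2 with
  | p :: t1, q :: t2 =>
      simp only [pvFoldB, List.cons_append, List.map_append, List.foldl_append, List.map_cons,
        List.foldl_cons]
      rw [pvComb_pull]

theorem pvBox_eq_foldB : ∀ (n : Nat) (rs : List (Int × Int × Int × Int)),
    rs.length ≤ n → rs ≠ [] → pvBox rs = pvFoldB rs := by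
  intro n
  induction n with
  | zero => intro rs h hne; cases rs with
      | nil => exact absurd rfl hne
      | cons p t => simp at h
  | succ n ih =>
      intro rs h hne
      match rs with
      | [(x, y, w, h)] => simp [pvBox, pvFoldB, pvToB]
      | p :: q :: t =>
          rw [pvBox]
          have hlen : (p :: q :: t).length = t.length + 2 := by simp
          set l := p :: q :: t with hl
          set mid := l.length / 2 with hmid
          have hm1 : 1 ≤ mid := by rw [hmid, hl]; simp; omega
          have hm2 : mid < l.length := by rw [hmid]; omega
          have htake : (l.take mid).length = mid := by
            simp [List.length_take]; omega
          have hdrop : (l.drop mid).length = l.length - mid := by simp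
          have htn : l.take mid ≠ [] := by
            intro hx; rw [hx] at htake; simp at htake; omega
          have hdn : l.drop mid ≠ [] := by
            intro hx; rw [hx] at hdrop; simp at hdrop; omega
          have hll : l.length ≤ n + 1 := h
          rw [ih (l.take mid) (by omega) htn, ih (l.drop mid) (by rw [hdrop]; omega) hdn]
          have := pvFoldB_append (l.take mid) (l.drop mid) htn hdn
          rw [List.take_append_drop] at this
          rw [this]
          rfl

-- the comb-fold computed componentwise: the four global reductions
theorem pvFold_components (t : List (Int × Int × Int × Int)) :
    ∀ (b : Int × Int × Int × Int),
      (t.map pvToB).foldl pvComb b =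
        (t.foldl (fun a q => max a q.1) b.1,
         t.foldl (fun a q => min a (q.1 + q.2.2.1)) b.2.1,
         t.foldl (fun a q => min a q.2.1) b.2.2.1,
         t.foldl (fun a q => max a (q.2.1 - q.2.2.2)) b.2.2.2) := by
  induction t with
  | nil => intro b; rfl
  | cons p t ih =>
      intro b
      simp only [List.map_cons, List.foldl_cons]
      rw [ih]
      rfl

-- foldl with max grows from its start; foldl with min shrinks from its start
theorem pv_foldl_max_ge (f : (Int × Int × Int × Int) → Int) :
    ∀ (rs : List (Int × Int × Int × Int)) (a : Int),
      a ≤ rs.foldl (fun s p => max s (f p)) a := by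
  intro rs
  induction rs with
  | nil => intro a; simp
  | cons p rs ih =>
      intro a
      simpa [List.foldl] using le_trans (le_max_left a (f p)) (ih (max a (f p)))

theorem pv_foldl_min_le (f : (Int × Int × Int × Int) → Int) :
    ∀ (rs : List (Int × Int × Int × Int)) (a : Int),
      rs.foldl (fun s p => min s (f p)) a ≤ a := by
  intro rs
  induction rs with
  | nil => intro a; simp
  | cons p rs ih =>
      intro a
      simpa [List.foldl] using le_trans (ih (min a (f p))) (min_le_left a (f p))

-- the loop of A equals the four global reductions, given the running
-- intersection is nonempty (the invariant A's guards maintain)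
theorem pvLoopA_eq_aux :
    ∀ (rs : List (Int × Int × Int × Int)) (l r t b : Int), l < r → b < t →
      pvLoopA l r t b rs =
        (let L := rs.foldl (fun a p => max a p.1) l
         let R := rs.foldl (fun a p => min a (p.1 + p.2.2.1)) r
         let T := rs.foldl (fun a p => min a p.2.1) t
         let B := rs.foldl (fun a p => max a (p.2.1 - p.2.2.2)) b
         if L ≥ R ∨ T ≤ B then 0 else (R - L) * (T - B)) := by
  intro rs
  induction rs with
  | nil =>
      intro l r t b hx hy
      simp only [pvLoopA, List.foldl]
      rw [if_neg (by omega)]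
  | cons p rs ih =>
      intro l r t b _ _
      obtain ⟨x, y, w, h⟩ := p
      simp only [pvLoopA, List.foldl]
      by_cases hx : max l x ≥ min r (x + w)
      · rw [if_pos hx]
        have hL := pv_foldl_max_ge (fun p => p.1) rs (max l x)
        have hR := pv_foldl_min_le (fun p => p.1 + p.2.2.1) rs (min r (x + w))
        rw [if_pos]; left; omega
      · rw [if_neg hx]
        by_cases hy : min t y ≤ max b (y - h)
        · rw [if_pos hy]
          have hT := pv_foldl_min_le (fun p => p.2.1) rs (min t y)
          have hB := pv_foldl_max_ge (fun p => p.2.1 - p.2.2.2) rs (max b (y - h))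
          rw [if_pos]; right; omega
        · rw [if_neg hy]
          exact ih (max l x) (min r (x + w)) (min t y) (max b (y - h)) (by omega) (by omega)

-- the same for a nonempty tail, with no hypothesis on the initial rectangle
theorem pvLoopA_eq (p : Int × Int × Int × Int) (rs : List (Int × Int × Int × Int))
    (l r t b : Int) :
    pvLoopA l r t b (p :: rs) =
      (let L := (p :: rs).foldl (fun a q => max a q.1) l
       let R := (p :: rs).foldl (fun a q => min a (q.1 + q.2.2.1)) r
       let T := (p :: rs).foldl (fun a q => min a q.2.1) t
       let B := (p :: rs).foldl (fun a q => max a (q.2.1 - q.2.2.2)) b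
       if L ≥ R ∨ T ≤ B then 0 else (R - L) * (T - B)) := by
  obtain ⟨x, y, w, h⟩ := p
  simp only [pvLoopA, List.foldl]
  by_cases hx : max l x ≥ min r (x + w)
  · rw [if_pos hx]
    have hL := pv_foldl_max_ge (fun p => p.1) rs (max l x)
    have hR := pv_foldl_min_le (fun p => p.1 + p.2.2.1) rs (min r (x + w))
    rw [if_pos]; left; omega
  · rw [if_neg hx]
    by_cases hy : min t y ≤ max b (y - h)
    · rw [if_pos hy]
      have hT := pv_foldl_min_le (fun p => p.2.1) rs (min t y)
      have hB := pv_foldl_max_ge (fun p => p.2.1 - p.2.2.2) rs (max b (y - h))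
      rw [if_pos]; right; omega
    · rw [if_neg hy]
      exact pvLoopA_eq_aux rs (max l x) (min r (x + w)) (min t y) (max b (y - h)) (by omega) (by omega)

-- ===== VERDICT (by name: the statement is the Claim_ definition above) =====
theorem compute_intersection_area_spec : Claim_equal_compute_intersection_area := by
  intro rectangles _
  unfold Spec_compute_intersection_area compute_intersection_area compute_intersection_area_alt
  split_ifs with hlen
  · rfl
  · match rectangles with
    | [] => simp at hlen
    | (x1, y1, w1, h1) :: [] => simp at hlen
    | (x1, y1, w1, h1) :: p :: rest =>
        rw [pvBox_eq_foldB ((x1, y1, w1, h1) :: p :: rest).length _ le_rfl (by simp)]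
        simp only [pvFoldB]
        rw [pvFold_components]
        simpa [pvToB] using pvLoopA_eq p rest x1 (x1 + w1) y1 (y1 - h1)
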